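-- pv_equiv track=rewrite | github.com/byoso/bin | ecran_taille.py | tableau
-- ===== SOURCE A (Python) =====
-- def tableau(x, y):
-- 	x = int(x/2)
-- 	y = int(y/2)
-- 	schema = '\n Schematisation :\n'
-- 	for i in range(x):
-- 		for i in range(y):
-- 			schema += '..'
-- 		schema += '\n'
--
-- 	return schema
-- ===== SOURCE B (Python) =====
-- def tableau(x, y):
--     header = '\n Schematisation :\n'
--     rows = int(x / 2)
--     if rows <= 0:
--         return header
--     return header + ('..' * int(y / 2) + '\n') * rows
-- ===== Notes on version B (the rewrite author's own statement) =====
-- stated objective: idiomatic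
-- what changed: Replaces the two nested accumulation loops by a closed-form string expression: the row is built once as '..'*int(y/2)+'\n' and repeated int(x/2) times by string multiplication (after a trivial zero-rows short-circuit).
import Mathlib
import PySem

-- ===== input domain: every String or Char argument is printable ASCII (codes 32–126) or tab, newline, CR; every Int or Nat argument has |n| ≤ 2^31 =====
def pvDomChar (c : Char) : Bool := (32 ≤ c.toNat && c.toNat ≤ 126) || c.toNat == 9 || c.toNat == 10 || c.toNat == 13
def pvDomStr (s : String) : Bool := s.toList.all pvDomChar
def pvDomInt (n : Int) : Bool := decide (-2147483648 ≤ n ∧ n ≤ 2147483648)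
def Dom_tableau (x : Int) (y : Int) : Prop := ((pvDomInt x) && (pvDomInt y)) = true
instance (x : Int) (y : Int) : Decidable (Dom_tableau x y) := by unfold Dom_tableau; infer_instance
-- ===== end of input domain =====

-- B replaces A's two nested accumulation loops by one closed-form string expression
-- (row built once, repeated by string multiplication); same exact output.

-- ===== PORT A =====
-- Literal port of A: int(x/2)/int(y/2) by PySem.Int.truncdiv (exact for |n| ≤ 2^31),
-- both for-loops as foldl over pyRange, string concatenation on List Char (exact).
def tableau (x : Int) (y : Int) : String :=
  let x' := PySem.Int.truncdiv x 2
  let y' := PySem.Int.truncdiv y 2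
  let schema : List Char := "\n Schematisation :\n".toList
  String.ofList ((PySem.List.pyRange 0 x' 1).foldl
    (fun s _ =>
      ((PySem.List.pyRange 0 y' 1).foldl (fun s2 _ => s2 ++ "..".toList) s) ++ "\n".toList)
    schema)

-- ===== PORT B =====
-- Literal port of B: string multiplication '..'*n and row*m as PySem.List.pyRepeat on char lists.
def tableau_alt (x : Int) (y : Int) : String :=
  let header : List Char := "\n Schematisation :\n".toList
  let rows := PySem.Int.truncdiv x 2
  if rows ≤ 0 then String.ofList header
  else
    String.ofList (header ++
      PySem.List.pyRepeat
        (PySem.List.pyRepeat "..".toList (PySem.Int.truncdiv y 2) ++ "\n".toList)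
        rows)

-- ===== PRECONDITION & SPEC =====
def Spec_tableau (x : Int) (y : Int) (out : String) : Prop := out = tableau_alt x y
instance (x : Int) (y : Int) (out : String) : Decidable (Spec_tableau x y out) := by unfold Spec_tableau; infer_instance

-- ===== CLAIM (what is proved, stated in full; the proofs are below) =====
def Claim_equal_tableau : Prop := ∀ (x : Int) (y : Int), Dom_tableau x y → Spec_tableau x y (tableau x y)

-- ===== LEMMAS AND PROOFS =====

-- a loop that appends the same block each iteration appends length-many copies
theorem pv_foldl_const_append {α β : Type} (l : List α) (b : List β) (s : List β) :
    l.foldl (fun acc _ => acc ++ b) s = s ++ (List.replicate l.length b).flatten := by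
  induction l generalizing s with
  | nil => simp
  | cons a t ih =>
      simp [List.foldl_cons, ih, List.replicate_succ, List.flatten_cons, List.append_assoc]

theorem pv_length_pyRange (n : Int) : (PySem.List.pyRange 0 n 1).length = n.toNat := by
  simp only [PySem.List.pyRange]
  split_ifs with h0 h1 <;> simp_all; omega

theorem tableau_eq_alt (x y : Int) : tableau x y = tableau_alt x y := by
  unfold tableau tableau_alt
  have hinner : ∀ s : List Char,
      (PySem.List.pyRange 0 (PySem.Int.truncdiv y 2) 1).foldl
        (fun s2 _ => s2 ++ "..".toList) s
      = s ++ PySem.List.pyRepeat "..".toList (PySem.Int.truncdiv y 2) := by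
    intro s
    rw [pv_foldl_const_append, pv_length_pyRange]
    rfl
  have houter :
      (fun (s : List Char) (_ : Int) =>
        ((PySem.List.pyRange 0 (PySem.Int.truncdiv y 2) 1).foldl
          (fun s2 _ => s2 ++ "..".toList) s) ++ "\n".toList)
      = fun (s : List Char) (_ : Int) =>
        s ++ (PySem.List.pyRepeat "..".toList (PySem.Int.truncdiv y 2) ++ "\n".toList) := by
    funext s i
    rw [hinner, List.append_assoc]
  simp only [houter]
  rw [pv_foldl_const_append, pv_length_pyRange]
  by_cases h : PySem.Int.truncdiv x 2 ≤ 0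
  · have hz : (PySem.Int.truncdiv x 2).toNat = 0 := Int.toNat_of_nonpos h
    simp [h, hz, PySem.List.pyRepeat]
  · simp [h, PySem.List.pyRepeat]

-- ===== VERDICT (by name: the statement is the Claim_ definition above) =====
theorem tableau_spec : Claim_equal_tableau := by
  intro x y _
  unfold Spec_tableau
  exact tableau_eq_alt x y
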